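-- pv_equiv track=rewrite | github.com/GeoscienceAustralia/EQIAT | RSA_VS30_to_MMI.py | vs30_to_NEHRP_class
-- ===== SOURCE A (Python) =====
-- def vs30_to_NEHRP_class(vs30):
--
--     vel1 = 760
--     vel2 = 360
--     vel3 = 180
--
--     class1 = "B"
--     class2 = "C"
--     class3 = "D"
--     class4 = "E"
--
--     NEHRP_class_list = []
--
--     for vs in vs30:
--
--         # Find site class using vs30
--         if vs >= vel1:
--             siteclass = class1
--         elif vs < vel1 and vs >= vel2:
--             siteclass = class2
--         elif vs < vel2 and vs >= vel3:
--             siteclass = class3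
--         elif vs < vel3:
--             siteclass = class4
--
--         NEHRP_class_list.append(siteclass)
--
--     return NEHRP_class_list
-- ===== SOURCE B (Python) =====
-- def vs30_to_NEHRP_class(vs30):
--     thresholds = [180, 360, 760]
--     labels = ["E", "D", "C", "B"]
--     return [labels[sum(1 for t in thresholds if vs >= t)] for vs in vs30]
-- ===== Notes on version B (the rewrite author's own statement) =====
-- stated objective: idiomatic
-- what changed: Replaces the descending if/elif cascade and append loop with a table lookup: a sorted thresholds list and parallel labels list, indexing labels by the count of thresholds the velocity meets, in a single comprehension.
import Mathlib
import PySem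

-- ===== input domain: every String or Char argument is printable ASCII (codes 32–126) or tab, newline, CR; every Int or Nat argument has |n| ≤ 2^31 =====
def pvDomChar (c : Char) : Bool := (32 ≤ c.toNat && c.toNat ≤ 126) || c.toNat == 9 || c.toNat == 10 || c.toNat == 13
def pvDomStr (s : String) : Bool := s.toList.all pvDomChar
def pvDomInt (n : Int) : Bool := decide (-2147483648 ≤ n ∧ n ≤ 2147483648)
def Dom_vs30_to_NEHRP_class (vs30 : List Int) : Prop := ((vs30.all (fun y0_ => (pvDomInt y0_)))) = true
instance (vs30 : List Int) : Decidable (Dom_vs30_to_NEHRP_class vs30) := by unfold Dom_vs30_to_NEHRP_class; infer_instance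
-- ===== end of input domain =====

-- B replaces A's if/elif cascade with a sorted-thresholds/labels table lookup (objective: idiomatic).


-- ===== PORT A =====
-- per-element site class: A's if/elif cascade, branches in order.
-- On Int the four branches are exhaustive; the final else is unreachable (in Python no
-- branch firing would leave `siteclass` unbound, impossible for ints).
def pvSiteClassA (vs : Int) : String :=
  if vs ≥ 760 then "B"
  else if vs < 760 ∧ vs ≥ 360 then "C"
  else if vs < 360 ∧ vs ≥ 180 then "D"
  else if vs < 180 then "E"
  else "E"

def vs30_to_NEHRP_class (vs30 : List Int) : List String :=
  vs30.foldl (fun acc vs => acc ++ [pvSiteClassA vs]) []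

-- ===== PORT B =====
-- count of thresholds the velocity meets (Source B's sum(1 for t in thresholds if vs >= t))
def pvCountGE (vs : Int) : Int :=
  ([180, 360, 760] : List Int).foldl (fun c t => if vs ≥ t then c + 1 else c) 0

def vs30_to_NEHRP_class_alt (vs30 : List Int) : List String :=
  vs30.map (fun vs => (["E", "D", "C", "B"] : List String).getD (pvCountGE vs).toNat "")

-- ===== PRECONDITION & SPEC =====
def Spec_vs30_to_NEHRP_class (vs30 : List Int) (out : List String) : Prop := out = vs30_to_NEHRP_class_alt vs30
instance (vs30 : List Int) (out : List String) : Decidable (Spec_vs30_to_NEHRP_class vs30 out) := by unfold Spec_vs30_to_NEHRP_class; infer_instance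

-- ===== CLAIM (what is proved, stated in full; the proofs are below) =====
def Claim_equal_vs30_to_NEHRP_class : Prop := ∀ (vs30 : List Int), Dom_vs30_to_NEHRP_class vs30 → Spec_vs30_to_NEHRP_class vs30 (vs30_to_NEHRP_class vs30)

-- ===== LEMMAS AND PROOFS =====

theorem pvSiteClass_eq (vs : Int) :
    pvSiteClassA vs = (["E", "D", "C", "B"] : List String).getD (pvCountGE vs).toNat "" := by
  unfold pvSiteClassA pvCountGE
  simp only [List.foldl]
  by_cases h1 : vs ≥ 760 <;> by_cases h2 : vs ≥ 360 <;> by_cases h3 : vs ≥ 180 <;>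
    simp [h1, h2, h3] <;> omega

theorem foldl_append_map (f : Int → String) (l : List Int) (acc : List String) :
    l.foldl (fun a x => a ++ [f x]) acc = acc ++ l.map f := by
  induction l generalizing acc with
  | nil => simp
  | cons x xs ih => simp [List.foldl, ih]

-- ===== VERDICT (by name: the statement is the Claim_ definition above) =====
theorem vs30_to_NEHRP_class_spec : Claim_equal_vs30_to_NEHRP_class := by
  intro vs30 _
  unfold Spec_vs30_to_NEHRP_class vs30_to_NEHRP_class vs30_to_NEHRP_class_alt
  rw [foldl_append_map]
  simp [pvSiteClass_eq]
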